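-- pv_equiv track=rewrite | github.com/Fraunhofer-FIT-DSAI/SASP | SASP/sasp/wiki_interface.py | _wide_tup_list_to_dict
-- ===== SOURCE A (Python) =====
-- def _wide_tup_list_to_dict(instance_tups):
--     """Converts a wide tuple list into a dictionary. This essentially makes
--     it narrow and then converts it into a dictionary. This is mainly required
--     for the use in creating an instance query.
--
--     Args:
--         instance_tups (List[Tuple[str, str]]): Wide tuple list of the instance
--
--     Returns:
--         Dict: Narrow tuple list as a dictionary
--     """
--     new_dict = {}
--     for attr, value in instance_tups:
--         if attr in new_dict:
--             new_dict[attr] = f'{new_dict[attr]},{value}'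
--         else:
--             new_dict[attr] = value
--
--     return new_dict
-- ===== SOURCE B (Python) =====
-- from collections import defaultdict
--
-- def _wide_tup_list_to_dict(instance_tups):
--     groups = defaultdict(list)
--     for attr, value in instance_tups:
--         groups[attr].append(value)
--     return {attr: ','.join(vals) for attr, vals in groups.items()}
-- ===== Notes on version B (the rewrite author's own statement) =====
-- stated objective: idiomatic
-- what changed: Group values per key into lists with a defaultdict in one pass, then build the result by joining each group with ',' in a dict comprehension, instead of rebuilding the accumulated string on every duplicate key.
import Mathlib
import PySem

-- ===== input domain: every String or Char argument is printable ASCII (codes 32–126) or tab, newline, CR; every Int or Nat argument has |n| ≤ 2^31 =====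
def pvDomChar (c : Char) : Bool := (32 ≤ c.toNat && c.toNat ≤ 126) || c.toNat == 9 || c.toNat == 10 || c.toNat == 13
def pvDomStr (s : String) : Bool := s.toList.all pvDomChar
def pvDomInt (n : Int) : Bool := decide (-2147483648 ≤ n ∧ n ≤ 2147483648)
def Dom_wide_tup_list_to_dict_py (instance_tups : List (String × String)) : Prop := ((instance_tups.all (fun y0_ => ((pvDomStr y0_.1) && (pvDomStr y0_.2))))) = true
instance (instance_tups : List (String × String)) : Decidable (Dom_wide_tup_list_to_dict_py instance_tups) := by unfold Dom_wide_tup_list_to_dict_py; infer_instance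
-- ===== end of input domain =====

-- B groups values per key into lists in one pass and joins each group with ',' afterwards,
-- instead of A's inline string re-concatenation on every duplicate key (objective: idiomatic).

-- ===== PORT A =====
-- f-string f'{old},{value}' is exactly ','.join([old, value]) = PySem.Str.join "," [old, value].
def wide_tup_list_to_dict_py (instance_tups : List (String × String)) : List (String × String) :=
  (instance_tups.foldl
    (fun new_dict p =>
      if new_dict.contains p.1 then
        new_dict.insert p.1 (PySem.Str.join "," [new_dict.getD p.1 "", p.2])
      else
        new_dict.insert p.1 p.2)
    (PySem.Dict.empty : PySem.Dict String String)).items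

-- ===== PORT B =====
def wide_tup_list_to_dict_py_alt (instance_tups : List (String × String)) : List (String × String) :=
  let groups : PySem.Dict String (List String) :=
    instance_tups.foldl (fun g p => g.modify p.1 [] (· ++ [p.2])) PySem.Dict.empty
  groups.items.map (fun p => (p.1, PySem.Str.join "," p.2))

-- ===== PRECONDITION & SPEC =====
def Spec_wide_tup_list_to_dict_py (instance_tups : List (String × String)) (out : List (String × String)) : Prop := out = wide_tup_list_to_dict_py_alt instance_tups
instance (instance_tups : List (String × String)) (out : List (String × String)) : Decidable (Spec_wide_tup_list_to_dict_py instance_tups out) := by unfold Spec_wide_tup_list_to_dict_py; infer_instance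

-- ===== CLAIM (what is proved, stated in full; the proofs are below) =====
def Claim_equal_wide_tup_list_to_dict_py : Prop := ∀ (instance_tups : List (String × String)), Dom_wide_tup_list_to_dict_py instance_tups → Spec_wide_tup_list_to_dict_py instance_tups (wide_tup_list_to_dict_py instance_tups)


-- ===== LEMMAS AND PROOFS =====

theorem chars_join_append_singleton (sep : List Char) (vs : List (List Char)) (v : List Char) (h : vs ≠ []) :
    PySem.Chars.join sep (vs ++ [v]) = PySem.Chars.join sep vs ++ sep ++ v := by
  induction vs with
  | nil => simp at h
  | cons a t ih =>
    cases t with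
    | nil => simp [PySem.Chars.join_singleton, PySem.Chars.join_cons_cons]
    | cons b t2 =>
      have := ih (by simp)
      simp only [List.cons_append, PySem.Chars.join_cons_cons]
      rw [show (b :: t2) ++ [v] = b :: (t2 ++ [v]) from rfl] at this
      rw [this]
      simp [List.append_assoc]

-- joining a nonempty group extended by one value = joining the old join with the value
theorem join_append_singleton (vs : List String) (v : String) (h : vs ≠ []) :
    PySem.Str.join "," (vs ++ [v]) = PySem.Str.join "," [PySem.Str.join "," vs, v] := by
  apply String.toList_injective
  rw [PySem.Str.toList_join, PySem.Str.toList_join]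
  simp only [List.map_append, List.map_cons, List.map_nil]
  rw [chars_join_append_singleton _ _ _ (by simpa using h)]
  rw [PySem.Chars.join_cons_cons, PySem.Chars.join_singleton, PySem.Str.toList_join]

theorem str_join_singleton (v : String) : PySem.Str.join "," [v] = v := by
  apply String.toList_injective
  rw [PySem.Str.toList_join]
  simp [PySem.Chars.join_singleton]

-- the step invariant: A's dict is B's group dict with every group joined
theorem step_invariant (ts : List (String × String))
    (d : PySem.Dict String String) (g : PySem.Dict String (List String))
    (hitems : d.items = g.items.map (fun p => (p.1, PySem.Str.join "," p.2)))
    (hne : ∀ p ∈ g.items, p.2 ≠ ([] : List String))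
    (hnd : g.keys.Nodup) :
    (ts.foldl
      (fun new_dict p =>
        if new_dict.contains p.1 then
          new_dict.insert p.1 (PySem.Str.join "," [new_dict.getD p.1 "", p.2])
        else
          new_dict.insert p.1 p.2) d).items
    = ((ts.foldl (fun g p => g.modify p.1 [] (· ++ [p.2])) g).items.map
        (fun p => (p.1, PySem.Str.join "," p.2))) := by
  induction ts generalizing d g with
  | nil => simpa using hitems
  | cons pr rest ih =>
    obtain ⟨k, v⟩ := pr
    have hdnd : d.keys.Nodup := by
      simpa [PySem.Dict.keys, hitems, List.map_map, Function.comp] using hnd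
    have hcont : d.contains k = g.contains k := by
      rw [PySem.Dict.contains_eq_decide_mem_keys, PySem.Dict.contains_eq_decide_mem_keys]
      simp [PySem.Dict.keys, hitems, List.map_map, Function.comp]
    simp only [List.foldl_cons, PySem.Dict.modify]
    by_cases hc : g.contains k = true
    · -- duplicate key: A re-joins the accumulated string, B appends to the group
      rw [PySem.Dict.contains_eq_isSome_get?] at hc
      obtain ⟨vs, hvs⟩ := Option.isSome_iff_exists.mp hc
      have hmem : (k, vs) ∈ g.items := (PySem.Dict.get?_eq_some_iff_mem_items g k vs hnd).mp hvs
      have hvsne : vs ≠ [] := hne _ hmem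
      have hgetg : g.getD k ([] : List String) = vs := PySem.Dict.getD_of_mem_items g hmem hnd _
      have hmemd : (k, PySem.Str.join "," vs) ∈ d.items := by
        rw [hitems]; exact List.mem_map.mpr ⟨(k, vs), hmem, rfl⟩
      have hgetd : d.getD k "" = PySem.Str.join "," vs := PySem.Dict.getD_of_mem_items d hmemd hdnd _
      have hcg : g.contains k = true := by
        rw [PySem.Dict.contains_eq_isSome_get?, hvs]; rfl
      rw [hcont, if_pos hcg, hgetd, hgetg]
      apply ih
      · rw [PySem.Dict.items_insert_of_contains d _ (by rw [hcont]; exact hcg),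
            PySem.Dict.items_insert_of_contains g _ hcg, hitems, List.map_map, List.map_map]
        apply List.map_congr_left
        intro q _
        by_cases hq : q.1 = k
        · simp [Function.comp, hq, join_append_singleton vs v hvsne]
        · simp [Function.comp, hq]
      · intro p hp
        rcases (PySem.Dict.mem_items_insert _ _ _ _).mp hp with h1 | h2
        · rw [h1]; simp
        · exact hne _ h2.1
      · exact PySem.Dict.nodup_keys_insert g k _ hnd
    · -- fresh key: both append a new entry
      have hcg : g.contains k = false := by simpa using hc
      rw [hcont, hcg, if_neg (by simp)]
      apply ih
      · rw [PySem.Dict.items_insert_of_not_contains d v (by rw [hcont]; exact hcg),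
            PySem.Dict.items_insert_of_not_contains g _ hcg, hitems, List.map_append]
        have hgd : g.getD k ([] : List String) = [] := by
          simp [PySem.Dict.getD_of_not_contains, hcg]
        simp [hgd, str_join_singleton]
      · intro p hp
        rcases (PySem.Dict.mem_items_insert _ _ _ _).mp hp with h1 | h2
        · rw [h1]; simp
        · exact hne _ h2.1
      · exact PySem.Dict.nodup_keys_insert g k _ hnd

-- ===== VERDICT (by name: the statement is the Claim_ definition above) =====
theorem wide_tup_list_to_dict_py_spec : Claim_equal_wide_tup_list_to_dict_py := by
  intro ts _
  unfold Spec_wide_tup_list_to_dict_py wide_tup_list_to_dict_py wide_tup_list_to_dict_py_alt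
  exact step_invariant ts PySem.Dict.empty PySem.Dict.empty rfl (by simp [PySem.Dict.empty]) (by simp)
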